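-- pv_equiv track=rewrite | github.com/ZAINAZHAR303/HireFlow | ai-backend/agents/job_matching_graph.py | _simple_categorize
-- ===== SOURCE A (Python) =====
-- from typing import List, Dict, Any
--
-- def _simple_categorize(skills: List[str]) -> List[str]:
--     """Simple rule-based categorization as fallback"""
--     skills_lower = [s.lower() for s in skills]
--     categories = []
--
--     frontend = ['react', 'vue', 'angular', 'html', 'css', 'javascript', 'typescript', 'next.js']
--     backend = ['node.js', 'python', 'django', 'fastapi', 'express', 'java', 'spring']
--     fullstack = ['full stack', 'fullstack', 'mern', 'mean']
--
--     if any(s in skills_lower for s in frontend):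
--         categories.append('Frontend Developer')
--     if any(s in skills_lower for s in backend):
--         categories.append('Backend Developer')
--     if any(s in skills_lower for s in fullstack) or (
--         any(s in skills_lower for s in frontend) and any(s in skills_lower for s in backend)
--     ):
--         categories.append('Full Stack Developer')
--
--     return categories or ['Software Developer']
-- ===== SOURCE B (Python) =====
-- from typing import List
--
-- _FRONTEND = frozenset(['react', 'vue', 'angular', 'html', 'css', 'javascript', 'typescript', 'next.js'])
-- _BACKEND = frozenset(['node.js', 'python', 'django', 'fastapi', 'express', 'java', 'spring'])
-- _FULLSTACK = frozenset(['full stack', 'fullstack', 'mern', 'mean'])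
--
-- def _simple_categorize(skills: List[str]) -> List[str]:
--     has_frontend = has_backend = has_fullstack = False
--     for skill in skills:
--         s = skill.lower()
--         has_frontend |= s in _FRONTEND
--         has_backend |= s in _BACKEND
--         has_fullstack |= s in _FULLSTACK
--     categories = []
--     if has_frontend:
--         categories.append('Frontend Developer')
--     if has_backend:
--         categories.append('Backend Developer')
--     if has_fullstack or (has_frontend and has_backend):
--         categories.append('Full Stack Developer')
--     return categories or ['Software Developer']
-- ===== Notes on version B (the rewrite author's own statement) =====
-- stated objective: faster
-- what changed: Inverts the traversal: instead of building a lowered copy of the skills list and scanning it once per keyword list (A re-evaluates the frontend/backend anys in the fullstack condition), B makes a single pass over the skills, lowering each once and updating three booleans by set membership, then emits the categories from the flags.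
import Mathlib
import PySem

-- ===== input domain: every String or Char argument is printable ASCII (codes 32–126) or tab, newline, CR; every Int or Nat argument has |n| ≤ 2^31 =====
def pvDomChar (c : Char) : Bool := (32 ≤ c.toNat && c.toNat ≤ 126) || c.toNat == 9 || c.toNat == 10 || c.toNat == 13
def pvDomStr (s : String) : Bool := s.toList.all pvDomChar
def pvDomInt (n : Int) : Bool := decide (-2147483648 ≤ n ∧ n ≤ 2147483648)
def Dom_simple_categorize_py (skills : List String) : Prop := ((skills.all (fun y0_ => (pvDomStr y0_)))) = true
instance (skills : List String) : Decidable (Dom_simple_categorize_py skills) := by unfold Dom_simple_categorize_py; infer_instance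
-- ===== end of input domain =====

-- ===== PORT A =====
-- B inverts the traversal: one pass over the skills with three membership flags,
-- instead of A's lowered copy plus one scan per keyword (objective: alternative).

-- A: membership helpers are literal transliterations of `any(s in skills_lower for s in kw)`
def simple_categorize_py (skills : List String) : List String :=
  let skills_lower := skills.map PySem.Str.lower
  let frontend : List String := ["react", "vue", "angular", "html", "css", "javascript", "typescript", "next.js"]
  let backend : List String := ["node.js", "python", "django", "fastapi", "express", "java", "spring"]
  let fullstack : List String := ["full stack", "fullstack", "mern", "mean"]
  let categories : List String := []
  let categories := if frontend.any (fun s => skills_lower.contains s)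
                    then categories ++ ["Frontend Developer"] else categories
  let categories := if backend.any (fun s => skills_lower.contains s)
                    then categories ++ ["Backend Developer"] else categories
  let categories := if fullstack.any (fun s => skills_lower.contains s) ||
                      (frontend.any (fun s => skills_lower.contains s) &&
                       backend.any (fun s => skills_lower.contains s))
                    then categories ++ ["Full Stack Developer"] else categories
  if categories = [] then ["Software Developer"] else categories

-- ===== PORT B =====
def pvFrontendSet : List String := ["react", "vue", "angular", "html", "css", "javascript", "typescript", "next.js"]
def pvBackendSet : List String := ["node.js", "python", "django", "fastapi", "express", "java", "spring"]
def pvFullstackSet : List String := ["full stack", "fullstack", "mern", "mean"]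

def simple_categorize_py_alt (skills : List String) : List String :=
  let flags := skills.foldl
    (fun (acc : Bool × Bool × Bool) skill =>
      let s := PySem.Str.lower skill
      (acc.1 || pvFrontendSet.contains s,
       acc.2.1 || pvBackendSet.contains s,
       acc.2.2 || pvFullstackSet.contains s))
    (false, false, false)
  let categories :=
    (if flags.1 then ["Frontend Developer"] else []) ++
    (if flags.2.1 then ["Backend Developer"] else []) ++
    (if flags.2.2 || (flags.1 && flags.2.1) then ["Full Stack Developer"] else [])
  if categories = [] then ["Software Developer"] else categories

-- ===== PRECONDITION & SPEC =====
def Spec_simple_categorize_py (skills : List String) (out : List String) : Prop := out = simple_categorize_py_alt skills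
instance (skills : List String) (out : List String) : Decidable (Spec_simple_categorize_py skills out) := by unfold Spec_simple_categorize_py; infer_instance

-- ===== CLAIM (what is proved, stated in full; the proofs are below) =====
def Claim_equal_simple_categorize_py : Prop := ∀ (skills : List String), Dom_simple_categorize_py skills → Spec_simple_categorize_py skills (simple_categorize_py skills)

-- ===== LEMMAS AND PROOFS =====

-- B's fold computes the disjunction of the per-skill membership tests.
theorem pv_fold_flags (skills : List String) (a b c : Bool) :
    skills.foldl
      (fun (acc : Bool × Bool × Bool) skill =>
        let s := PySem.Str.lower skill
        (acc.1 || pvFrontendSet.contains s,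
         acc.2.1 || pvBackendSet.contains s,
         acc.2.2 || pvFullstackSet.contains s))
      (a, b, c)
    = (a || skills.any (fun x => pvFrontendSet.contains (PySem.Str.lower x)),
       b || skills.any (fun x => pvBackendSet.contains (PySem.Str.lower x)),
       c || skills.any (fun x => pvFullstackSet.contains (PySem.Str.lower x))) := by
  induction skills generalizing a b c with
  | nil => simp
  | cons h t ih =>
    simp only [List.foldl_cons]
    rw [ih]
    simp [Bool.or_assoc]

-- Swapping the traversal: scanning the keyword list against the lowered skills
-- equals scanning the skills and lowering each.
theorem pv_any_swap (L skills : List String) :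
    L.any (fun s => (skills.map PySem.Str.lower).contains s)
    = skills.any (fun x => L.contains (PySem.Str.lower x)) := by
  apply Bool.eq_iff_iff.mpr
  simp only [List.any_eq_true, List.contains_iff_mem, List.mem_map]
  constructor
  · rintro ⟨s, hs, x, hx, rfl⟩; exact ⟨x, hx, hs⟩
  · rintro ⟨x, hx, hs⟩; exact ⟨_, hs, x, hx, rfl⟩

-- ===== VERDICT (by name: the statement is the Claim_ definition above) =====
theorem simple_categorize_py_spec : Claim_equal_simple_categorize_py := by
  intro skills _
  unfold Spec_simple_categorize_py simple_categorize_py simple_categorize_py_alt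
  rw [pv_fold_flags]
  simp only [Bool.false_or, pv_any_swap, pvFrontendSet, pvBackendSet, pvFullstackSet]
  cases skills.any fun x => (["react", "vue", "angular", "html", "css", "javascript", "typescript", "next.js"] : List String).contains (PySem.Str.lower x) <;>
  cases skills.any fun x => (["node.js", "python", "django", "fastapi", "express", "java", "spring"] : List String).contains (PySem.Str.lower x) <;>
  cases skills.any fun x => (["full stack", "fullstack", "mern", "mean"] : List String).contains (PySem.Str.lower x) <;>
  simp
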